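-- pv_equiv track=rewrite | github.com/hanjuhn/agent-cast | agents/query_writer_agent.py | _extract_research_priorities
-- ===== SOURCE A (Python) =====
-- from typing import Any, Dict, List
--
-- def _extract_research_priorities(rag_query_data: Dict[str, Any]) -> List[Dict[str, Any]]:
--     """LLM 응답에서 연구 우선순위를 추출합니다."""
--     priorities = rag_query_data.get("research_priorities", []) if isinstance(rag_query_data, dict) else []
--
--     # 기본 구조 보장
--     formatted_priorities = []
--     for priority in priorities:
--         if isinstance(priority, dict):
--             formatted_priorities.append({
--                 "topic": priority.get("topic", ""),
--                 "priority": priority.get("priority", "medium"),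
--                 "source": "llm_analysis",
--                 "rationale": priority.get("rationale", ""),
--                 "deadline": None
--             })
--
--     # 우선순위별 정렬
--     priority_order = {"high": 1, "medium": 2, "low": 3}
--     formatted_priorities.sort(key=lambda x: priority_order.get(x["priority"], 3))
--
--     return formatted_priorities
-- ===== SOURCE B (Python) =====
-- def _extract_research_priorities(rag_query_data):
--     priorities = rag_query_data.get("research_priorities", []) if isinstance(rag_query_data, dict) else []
--
--     formatted = [
--         {
--             "topic": p.get("topic", ""),
--             "priority": p.get("priority", "medium"),
--             "source": "llm_analysis",
--             "rationale": p.get("rationale", ""),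
--             "deadline": None,
--         }
--         for p in priorities
--         if isinstance(p, dict)
--     ]
--
--     # single bucket pass instead of a comparison sort: 'low' and any
--     # unrecognized priority share the last bucket, in original order
--     high, medium, rest = [], [], []
--     for item in formatted:
--         if item["priority"] == "high":
--             high.append(item)
--         elif item["priority"] == "medium":
--             medium.append(item)
--         else:
--             rest.append(item)
--     return high + medium + rest
-- ===== Notes on version B (the rewrite author's own statement) =====
-- stated objective: alternative
-- what changed: The final stable comparison sort by a 3-valued priority key is replaced by a single bucket pass that appends each formatted item to a high/medium/rest list (low and unrecognized priorities share the rest bucket in original order) and returns their concatenation.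
import Mathlib
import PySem

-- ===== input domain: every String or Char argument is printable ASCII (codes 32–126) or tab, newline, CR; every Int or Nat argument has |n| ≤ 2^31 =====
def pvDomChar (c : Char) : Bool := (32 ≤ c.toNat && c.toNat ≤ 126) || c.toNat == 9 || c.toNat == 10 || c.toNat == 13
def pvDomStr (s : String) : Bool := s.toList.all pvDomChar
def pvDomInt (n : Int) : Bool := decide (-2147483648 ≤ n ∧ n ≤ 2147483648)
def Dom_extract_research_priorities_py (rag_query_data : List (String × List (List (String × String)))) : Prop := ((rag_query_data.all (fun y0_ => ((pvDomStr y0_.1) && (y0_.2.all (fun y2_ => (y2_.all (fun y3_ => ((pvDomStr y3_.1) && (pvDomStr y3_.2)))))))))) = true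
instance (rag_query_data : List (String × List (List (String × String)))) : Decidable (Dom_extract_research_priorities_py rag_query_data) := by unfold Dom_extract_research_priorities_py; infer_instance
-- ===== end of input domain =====

-- B replaces the final comparison sort (stable sort by a 3-valued key) with a single
-- bucket pass (high / medium / rest, concatenated); same return value, alternative algorithm.

-- ===== PORT A =====
-- dict literal built for each priority entry (keys in Python's insertion order)
def pvFmtA (p : List (String × String)) : List (String × Option String) :=
  [("topic", some ((List.lookup "topic" p).getD "")),
   ("priority", some ((List.lookup "priority" p).getD "medium")),
   ("source", some "llm_analysis"),
   ("rationale", some ((List.lookup "rationale" p).getD "")),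
   ("deadline", none)]

-- priority_order = {"high": 1, "medium": 2, "low": 3}
def pvPriorityOrder : List (String × Int) := [("high", 1), ("medium", 2), ("low", 3)]

-- key=lambda x: priority_order.get(x["priority"], 3); on A's own data x["priority"]
-- always exists and holds a string, so the catch-all arm (a non-string key, which
-- Python's dict.get would also send to the default 3) is unreachable
def pvKeyA (x : List (String × Option String)) : Int :=
  match List.lookup "priority" x with
  | some (some s) => (List.lookup s pvPriorityOrder).getD 3
  | _ => 3

def extract_research_priorities_py (rag_query_data : List (String × List (List (String × String)))) : List (List (String × Option String)) :=
  let priorities := (List.lookup "research_priorities" rag_query_data).getD []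
  -- for priority in priorities: if isinstance(priority, dict): formatted.append({…})
  -- (the isinstance test is identically true under this typing)
  let formatted := priorities.foldl (fun acc p => acc ++ [pvFmtA p]) []
  PySem.List.sorted formatted pvKeyA

-- ===== PORT B =====
def pvFmtB (p : List (String × String)) : List (String × Option String) :=
  [("topic", some ((List.lookup "topic" p).getD "")),
   ("priority", some ((List.lookup "priority" p).getD "medium")),
   ("source", some "llm_analysis"),
   ("rationale", some ((List.lookup "rationale" p).getD "")),
   ("deadline", none)]

def pvIsHigh (x : List (String × Option String)) : Bool :=
  List.lookup "priority" x == some (some "high")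

def pvIsMed (x : List (String × Option String)) : Bool :=
  List.lookup "priority" x == some (some "medium")

def extract_research_priorities_py_alt (rag_query_data : List (String × List (List (String × String)))) : List (List (String × Option String)) :=
  let priorities := (List.lookup "research_priorities" rag_query_data).getD []
  -- list comprehension (isinstance identically true under this typing)
  let formatted := priorities.map pvFmtB
  -- single bucket pass: high / medium / everything else, in original order
  let buckets := formatted.foldl
    (fun t item =>
      if pvIsHigh item then (t.1 ++ [item], t.2.1, t.2.2)
      else if pvIsMed item then (t.1, t.2.1 ++ [item], t.2.2)
      else (t.1, t.2.1, t.2.2 ++ [item]))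
    ([], [], [])
  buckets.1 ++ buckets.2.1 ++ buckets.2.2

-- ===== PRECONDITION & SPEC =====
def Spec_extract_research_priorities_py (rag_query_data : List (String × List (List (String × String)))) (out : List (List (String × Option String))) : Prop := out = extract_research_priorities_py_alt rag_query_data
instance (rag_query_data : List (String × List (List (String × String)))) (out : List (List (String × Option String))) : Decidable (Spec_extract_research_priorities_py rag_query_data out) := by unfold Spec_extract_research_priorities_py; infer_instance

-- ===== CLAIM (what is proved, stated in full; the proofs are below) =====
def Claim_equal_extract_research_priorities_py : Prop := ∀ (rag_query_data : List (String × List (List (String × String)))), Dom_extract_research_priorities_py rag_query_data → Spec_extract_research_priorities_py rag_query_data (extract_research_priorities_py rag_query_data)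

-- ===== LEMMAS AND PROOFS =====

-- insertBy goes to the very front when it precedes every element
lemma pv_insertBy_head {α : Type} (before : α → α → Bool) (x : α) (zs : List α)
    (h : ∀ z ∈ zs, before x z = true) :
    PySem.List.insertBy before x zs = x :: zs := by
  cases zs with
  | nil => rfl
  | cons z t => simp [PySem.List.insertBy, h z (by simp)]

-- insertBy skips a prefix it does not precede
lemma pv_insertBy_skip {α : Type} (before : α → α → Bool) (x : α) (ys zs : List α)
    (h : ∀ y ∈ ys, before x y = false) :
    PySem.List.insertBy before x (ys ++ zs) = ys ++ PySem.List.insertBy before x zs := by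
  induction ys with
  | nil => rfl
  | cons y t ih =>
      simp only [List.cons_append, PySem.List.insertBy, h y (by simp)]
      simp only [Bool.false_eq_true, if_false]
      rw [ih (fun y hy => h y (by simp [hy]))]

-- invariant of the stable insertion-sort fold when the key only takes values 1, 2, 3
lemma pv_sort3_aux {α : Type} (key : α → Int)
    (hk : ∀ x, key x = 1 ∨ key x = 2 ∨ key x = 3)
    (xs : List α) : ∀ (b1 b2 b3 : List α),
    (∀ y ∈ b1, key y = 1) → (∀ y ∈ b2, key y = 2) → (∀ y ∈ b3, key y = 3) →
    xs.foldl (fun acc x => PySem.List.insertBy (fun a b => decide (key a < key b)) x acc)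
        (b1 ++ (b2 ++ b3))
      = (b1 ++ xs.filter (fun x => key x == 1)) ++
        ((b2 ++ xs.filter (fun x => key x == 2)) ++ (b3 ++ xs.filter (fun x => key x == 3))) := by
  induction xs with
  | nil => intro b1 b2 b3 _ _ _; simp
  | cons x t ih =>
      intro b1 b2 b3 h1 h2 h3
      simp only [List.foldl_cons]
      rcases hk x with hx | hx | hx
      · rw [pv_insertBy_skip _ x b1 (b2 ++ b3)
              (by intro y hy; simp [hx, h1 y hy]),
            pv_insertBy_head _ x (b2 ++ b3)
              (by intro z hz; rcases List.mem_append.1 hz with h | h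
                  · simp [hx, h2 z h]
                  · simp [hx, h3 z h])]
        have : b1 ++ x :: (b2 ++ b3) = (b1 ++ [x]) ++ (b2 ++ b3) := by simp
        rw [this, ih (b1 ++ [x]) b2 b3
              (by intro y hy; rcases List.mem_append.1 hy with h | h
                  · exact h1 y h
                  · simp at h; simpa [h] using hx) h2 h3]
        simp [hx, List.append_assoc]
      · have : b1 ++ (b2 ++ b3) = (b1 ++ b2) ++ b3 := by simp
        rw [this, pv_insertBy_skip _ x (b1 ++ b2) b3
              (by intro y hy; rcases List.mem_append.1 hy with h | h
                  · simp [hx, h1 y h]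
                  · simp [hx, h2 y h]),
            pv_insertBy_head _ x b3 (by intro z hz; simp [hx, h3 z hz])]
        have e2 : (b1 ++ b2) ++ x :: b3 = b1 ++ ((b2 ++ [x]) ++ b3) := by simp
        rw [e2, ih b1 (b2 ++ [x]) b3 h1
              (by intro y hy; rcases List.mem_append.1 hy with h | h
                  · exact h2 y h
                  · simp at h; simpa [h] using hx) h3]
        simp [hx, List.append_assoc]
      · rw [PySem.List.insertBy_of_forall_not_before _ x (b1 ++ (b2 ++ b3))
              (by intro y hy
                  rcases List.mem_append.1 hy with h | h
                  · simp [hx, h1 y h]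
                  · rcases List.mem_append.1 h with h' | h'
                    · simp [hx, h2 y h']
                    · simp [hx, h3 y h'])]
        have : (b1 ++ (b2 ++ b3)) ++ [x] = b1 ++ (b2 ++ (b3 ++ [x])) := by simp
        rw [this, ih b1 b2 (b3 ++ [x]) h1 h2
              (by intro y hy; rcases List.mem_append.1 hy with h | h
                  · exact h3 y h
                  · simp at h; simpa [h] using hx)]
        simp [hx, List.append_assoc]

-- a stable sort by a {1,2,3}-valued key is the concatenation of the three key classes
lemma pv_sort3 {α : Type} (key : α → Int) (hk : ∀ x, key x = 1 ∨ key x = 2 ∨ key x = 3)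
    (xs : List α) :
    PySem.List.sorted xs key
      = xs.filter (fun x => key x == 1) ++ xs.filter (fun x => key x == 2) ++
        xs.filter (fun x => key x == 3) := by
  rw [PySem.List.sorted_eq_foldl_insertBy]
  simpa [List.append_assoc] using
    pv_sort3_aux key hk xs [] [] [] (by simp) (by simp) (by simp)

-- B's bucket fold computes three filters
lemma pv_buckets {α : Type} (p q : α → Bool) (xs : List α) : ∀ (a b c : List α),
    xs.foldl (fun t x =>
        if p x then (t.1 ++ [x], t.2.1, t.2.2)
        else if q x then (t.1, t.2.1 ++ [x], t.2.2)
        else (t.1, t.2.1, t.2.2 ++ [x])) (a, b, c)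
      = (a ++ xs.filter p, b ++ xs.filter (fun x => !p x && q x),
         c ++ xs.filter (fun x => !p x && !q x)) := by
  induction xs with
  | nil => intro a b c; simp
  | cons x t ih =>
      intro a b c
      by_cases hp : p x
      · simp [hp, ih, List.append_assoc]
      · by_cases hq : q x <;> simp [hp, hq, ih, List.append_assoc]

lemma pv_keyA_mem (x : List (String × Option String)) :
    pvKeyA x = 1 ∨ pvKeyA x = 2 ∨ pvKeyA x = 3 := by
  unfold pvKeyA
  rcases List.lookup "priority" x with _ | (_ | s)
  · simp
  · simp
  · simp only [pvPriorityOrder, List.lookup]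
    cases h1 : s == "high" <;> cases h2 : s == "medium" <;> cases h3 : s == "low" <;> simp_all

lemma pv_keyA_one (x : List (String × Option String)) :
    (pvKeyA x == 1) = pvIsHigh x := by
  unfold pvKeyA pvIsHigh
  rcases List.lookup "priority" x with _ | (_ | s)
  · simp
  · simp
  · simp only [pvPriorityOrder, List.lookup]
    cases h1 : s == "high" <;> cases h2 : s == "medium" <;> cases h3 : s == "low" <;> simp_all

lemma pv_keyA_two (x : List (String × Option String)) :
    (pvKeyA x == 2) = (!pvIsHigh x && pvIsMed x) := by
  unfold pvKeyA pvIsHigh pvIsMed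
  rcases List.lookup "priority" x with _ | (_ | s)
  · simp
  · simp
  · simp only [pvPriorityOrder, List.lookup]
    cases h1 : s == "high" <;> cases h2 : s == "medium" <;> cases h3 : s == "low" <;> simp_all

lemma pv_keyA_three (x : List (String × Option String)) :
    (pvKeyA x == 3) = (!pvIsHigh x && !pvIsMed x) := by
  unfold pvKeyA pvIsHigh pvIsMed
  rcases List.lookup "priority" x with _ | (_ | s)
  · simp
  · simp
  · simp only [pvPriorityOrder, List.lookup]
    cases h1 : s == "high" <;> cases h2 : s == "medium" <;> cases h3 : s == "low" <;> simp_all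

-- ===== VERDICT (by name: the statement is the Claim_ definition above) =====
theorem extract_research_priorities_py_spec : Claim_equal_extract_research_priorities_py := by
  intro rag _
  unfold Spec_extract_research_priorities_py
  unfold extract_research_priorities_py extract_research_priorities_py_alt
  simp only []
  rw [PySem.List.foldl_append_singleton_eq_map, List.nil_append]
  rw [pv_buckets]
  have hf : pvFmtA = pvFmtB := rfl
  rw [hf, pv_sort3 pvKeyA pv_keyA_mem]
  rw [List.filter_congr (fun x _ => pv_keyA_one x),
      List.filter_congr (fun x _ => pv_keyA_two x),
      List.filter_congr (fun x _ => pv_keyA_three x)]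
  simp [List.append_assoc]
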